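-- pv_equiv track=rewrite | github.com/zen-wang/CSE-598-Tau-Bench-Phase-3 | scripts/error_analysis_folder.py | check_user_confirmation_before_action
-- ===== SOURCE A (Python) =====
-- def check_user_confirmation_before_action(traj, action_name):
--     for i, msg in enumerate(traj):
--         if msg.get("role") != "assistant":
--             continue
--         content = msg.get("content") or ""
--         if action_name in content:
--             for j in range(i - 1, -1, -1):
--                 prev = traj[j]
--                 if prev.get("role") == "user":
--                     pc = (prev.get("content") or "").lower()
--                     if pc.startswith("api output"):
--                         continue
--                     return any(w in pc for w in ["yes", "confirm", "proceed", "go ahead", "sure"])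
--                 elif prev.get("role") == "assistant":
--                     pa = (prev.get("content") or "").lower()
--                     if any(p in pa for p in [
--                         "confirm", "would you like to proceed", "shall i proceed",
--                         "do you want to", "would you like me to", "please confirm"
--                     ]):
--                         continue
--                     break
--     return False
-- ===== SOURCE B (Python) =====
-- def check_user_confirmation_before_action(traj, action_name):
--     confirm_words = ["yes", "confirm", "proceed", "go ahead", "sure"]
--     prompts = ["confirm", "would you like to proceed", "shall i proceed",
--                "do you want to", "would you like me to", "please confirm"]
--     # `pending` is what a backward scan from the current position would find:
--     # None if it would hit a non-prompt assistant message (or the start),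
--     # otherwise the confirmation verdict of the nearest qualifying user message.
--     pending = None
--     for msg in traj:
--         role = msg.get("role")
--         content = msg.get("content") or ""
--         if role == "assistant":
--             if action_name in content and pending is not None:
--                 return pending
--             low = content.lower()
--             if not any(p in low for p in prompts):
--                 pending = None
--         elif role == "user":
--             low = content.lower()
--             if not low.startswith("api output"):
--                 pending = any(w in low for w in confirm_words)
--     return False
-- ===== Notes on version B (the rewrite author's own statement) =====
-- stated objective: alternative
-- what changed: Replaces A's backward rescan of the whole prefix at every matching assistant message with a single forward pass that maintains the verdict such a backward scan would yield, so the inner scan disappears.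
import Mathlib
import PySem

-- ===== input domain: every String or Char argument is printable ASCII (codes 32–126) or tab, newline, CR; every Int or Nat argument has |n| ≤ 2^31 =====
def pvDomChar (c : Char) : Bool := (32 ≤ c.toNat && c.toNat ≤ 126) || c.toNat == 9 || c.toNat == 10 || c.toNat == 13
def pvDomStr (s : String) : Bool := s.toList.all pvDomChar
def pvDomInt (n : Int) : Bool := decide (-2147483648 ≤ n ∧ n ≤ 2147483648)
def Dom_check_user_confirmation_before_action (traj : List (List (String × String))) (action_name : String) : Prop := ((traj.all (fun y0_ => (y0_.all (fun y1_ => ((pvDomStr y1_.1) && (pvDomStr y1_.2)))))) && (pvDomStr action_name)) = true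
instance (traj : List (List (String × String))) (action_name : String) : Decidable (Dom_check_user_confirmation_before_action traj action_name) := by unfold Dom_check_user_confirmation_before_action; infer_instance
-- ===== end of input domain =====

-- B replaces A's backward rescan at each matching assistant message by one forward
-- pass that maintains the verdict such a backward scan would produce.

-- shared literal word lists from the Python sources
def pvConfirmWords : List String := ["yes", "confirm", "proceed", "go ahead", "sure"]
def pvPromptPhrases : List String :=
  ["confirm", "would you like to proceed", "shall i proceed",
   "do you want to", "would you like me to", "please confirm"]

-- msg.get("role") / (msg.get("content") or "")
def pvGetRole (msg : List (String × String)) : Option String := (PySem.Dict.mk msg).get? "role"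
def pvGetContent (msg : List (String × String)) : String := ((PySem.Dict.mk msg).get? "content").getD ""

-- ===== PORT A =====
-- inner loop 'for j in range(i-1, -1, -1)': some b = 'return b', none = break / loop exhausted
def pvInnerA (traj : List (List (String × String))) : List Int → Option Bool
  | [] => none
  | j :: rest =>
    match PySem.List.pyGet? traj j with
    | none => none   -- unreachable: every j produced by range(i-1,-1,-1) is a valid index
    | some prev =>
      if pvGetRole prev == some "user" then
        let pc := PySem.Str.lower (pvGetContent prev)
        if PySem.Str.startswith pc "api output" then pvInnerA traj rest
        else some (pvConfirmWords.any (fun w => PySem.Str.isIn w pc))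
      else if pvGetRole prev == some "assistant" then
        let pa := PySem.Str.lower (pvGetContent prev)
        if pvPromptPhrases.any (fun p => PySem.Str.isIn p pa) then pvInnerA traj rest
        else none
      else pvInnerA traj rest

-- outer loop 'for i, msg in enumerate(traj)'
def pvOuterA (traj : List (List (String × String))) (action_name : String) :
    Int → List (List (String × String)) → Bool
  | _, [] => false
  | i, msg :: rest =>
    if !(pvGetRole msg == some "assistant") then pvOuterA traj action_name (i + 1) rest
    else
      let content := pvGetContent msg
      if PySem.Str.isIn action_name content then
        match pvInnerA traj (PySem.List.pyRange (i - 1) (-1) (-1)) with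
        | some b => b
        | none => pvOuterA traj action_name (i + 1) rest
      else pvOuterA traj action_name (i + 1) rest

def check_user_confirmation_before_action (traj : List (List (String × String))) (action_name : String) : Bool :=
  pvOuterA traj action_name 0 traj

-- ===== PORT B =====
-- single forward pass; `pending` = verdict a backward scan from here would yield
def pvGoB (action_name : String) :
    Option Bool → List (List (String × String)) → Bool
  | _, [] => false
  | pending, msg :: rest =>
    let role := pvGetRole msg
    let content := pvGetContent msg
    if role == some "assistant" then
      if PySem.Str.isIn action_name content && pending.isSome then pending.getD false
      else
        let low := PySem.Str.lower content
        pvGoB action_name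
          (if pvPromptPhrases.any (fun p => PySem.Str.isIn p low) then pending else none) rest
    else if role == some "user" then
      let low := PySem.Str.lower content
      pvGoB action_name
        (if PySem.Str.startswith low "api output" then pending
         else some (pvConfirmWords.any (fun w => PySem.Str.isIn w low))) rest
    else pvGoB action_name pending rest

def check_user_confirmation_before_action_alt (traj : List (List (String × String))) (action_name : String) : Bool :=
  pvGoB action_name none traj

-- ===== PRECONDITION & SPEC =====
def Spec_check_user_confirmation_before_action (traj : List (List (String × String))) (action_name : String) (out : Bool) : Prop := out = check_user_confirmation_before_action_alt traj action_name
instance (traj : List (List (String × String))) (action_name : String) (out : Bool) : Decidable (Spec_check_user_confirmation_before_action traj action_name out) := by unfold Spec_check_user_confirmation_before_action; infer_instance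

-- ===== CLAIM (what is proved, stated in full; the proofs are below) =====
def Claim_equal_check_user_confirmation_before_action : Prop := ∀ (traj : List (List (String × String))) (action_name : String), Dom_check_user_confirmation_before_action traj action_name → Spec_check_user_confirmation_before_action traj action_name (check_user_confirmation_before_action traj action_name)

-- ===== LEMMAS AND PROOFS =====

-- what A's backward scan computes, as structural recursion on the REVERSED prefix
def pvRevScan : List (List (String × String)) → Option Bool
  | [] => none
  | prev :: rest =>
    if pvGetRole prev == some "user" then
      let pc := PySem.Str.lower (pvGetContent prev)
      if PySem.Str.startswith pc "api output" then pvRevScan rest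
      else some (pvConfirmWords.any (fun w => PySem.Str.isIn w pc))
    else if pvGetRole prev == some "assistant" then
      let pa := PySem.Str.lower (pvGetContent prev)
      if pvPromptPhrases.any (fun p => PySem.Str.isIn p pa) then pvRevScan rest
      else none
    else pvRevScan rest

lemma pvInnerA_eq_revScan (pre suf : List (List (String × String))) :
    pvInnerA (pre ++ suf) (PySem.List.pyRange ((pre.length : Int) - 1) (-1) (-1)) =
      pvRevScan pre.reverse := by
  induction pre using List.reverseRecOn generalizing suf with
  | nil =>
      rw [PySem.List.pyRange_neg_one_eq_nil (by norm_num)]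
      simp [pvInnerA, pvRevScan]
  | append_singleton pre x ih =>
      have hlen : ((pre ++ [x]).length : Int) - 1 = (pre.length : Int) := by simp
      rw [hlen, PySem.List.pyRange_neg_one_cons (by omega)]
      have hget : PySem.List.pyGet? (pre ++ x :: suf) (pre.length : Int) = some x := by
        rw [PySem.List.pyGet?_natCast, List.getElem?_append_right (le_refl _)]
        simp
      simp only [List.append_assoc, List.singleton_append, List.reverse_append,
        List.reverse_singleton, pvInnerA, hget, pvRevScan, ih (x :: suf)]

lemma pvOuter_eq_goB (action_name : String) (suf pre : List (List (String × String))) :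
    pvOuterA (pre ++ suf) action_name (pre.length : Int) suf =
      pvGoB action_name (pvRevScan pre.reverse) suf := by
  induction suf generalizing pre with
  | nil => simp [pvOuterA, pvGoB]
  | cons msg rest ih =>
      have ihx := ih (pre ++ [msg])
      simp only [List.append_assoc, List.singleton_append, List.reverse_append,
        List.reverse_singleton, List.length_append, List.length_cons, List.length_nil,
        Nat.cast_add, Nat.cast_one, zero_add] at ihx
      simp only [pvOuterA, pvGoB]
      by_cases hA : pvGetRole msg = some "assistant"
      · by_cases hin : PySem.Chars.isIn action_name.toList (pvGetContent msg).toList = true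
        · have hinner := pvInnerA_eq_revScan pre (msg :: rest)
          cases hp : pvRevScan pre.reverse with
          | some b => simp [hA, hin, hinner, hp]
          | none => simp [hA, hin, hinner, hp, ihx, pvRevScan]
        · simp [hA, hin, ihx, pvRevScan]
      · by_cases hU : pvGetRole msg = some "user"
        · simp [hU, ihx, pvRevScan]
        · simp [hA, hU, ihx, pvRevScan]

-- ===== VERDICT (by name: the statement is the Claim_ definition above) =====
theorem check_user_confirmation_before_action_spec : Claim_equal_check_user_confirmation_before_action := by
  intro traj action_name _
  unfold Spec_check_user_confirmation_before_action
  unfold check_user_confirmation_before_action check_user_confirmation_before_action_alt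
  have h := pvOuter_eq_goB action_name traj []
  simpa [pvRevScan] using h
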